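-- pv_equiv track=rewrite | github.com/GUODnuli/TestAssistiant | services/test_case_management_service.py | group_test_cases_by_logic
-- ===== SOURCE A (Python) =====
-- from typing import List, Dict, Any
--
-- def group_test_cases_by_logic(test_points: List[Dict[str, Any]]) -> Dict[str, List[Dict[str, Any]]]:
--     """
--     按逻辑关系对测试要点进行分组（每5个要点为一组）
--
--     Args:
--         test_points: 测试要点列表
--
--     Returns:
--         分组后的测试要点字典
--     """
--     grouped_points = {}
--
--     # 每5个测试要点为一组
--     group_size = 5
--     for i in range(0, len(test_points), group_size):
--         group_number = i // group_size + 1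
--         group_name = f"测试组 {group_number}"
--         grouped_points[group_name] = test_points[i:i + group_size]
--
--     return grouped_points
-- ===== SOURCE B (Python) =====
-- from typing import List, Dict, Any
--
-- def _chunks(rest: List[Dict[str, Any]], g: int) -> List:
--     """Recursively peel off the first 5 elements, producing (name, chunk) pairs."""
--     if not rest:
--         return []
--     return [(f"测试组 {g}", rest[:5])] + _chunks(rest[5:], g + 1)
--
-- def group_test_cases_by_logic(test_points: List[Dict[str, Any]]) -> Dict[str, List[Dict[str, Any]]]:
--     """Recursive decomposition: build the (name, chunk) pair list by structural
--     recursion on the list (peel 5, recurse on the rest), then turn it into a dict,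
--     instead of A's index-window loop over range(0, n, 5)."""
--     return dict(_chunks(test_points, 1))
-- ===== Notes on version B (the rewrite author's own statement) =====
-- stated objective: alternative
-- what changed: Replaced A's index-window loop (range(0,n,5) with a slice per index, inserting into the dict inside the loop) by a recursive helper that peels 5 elements off the front per call to build the (name, chunk) pair list, converted to a dict at the end with dict().
import Mathlib
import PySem

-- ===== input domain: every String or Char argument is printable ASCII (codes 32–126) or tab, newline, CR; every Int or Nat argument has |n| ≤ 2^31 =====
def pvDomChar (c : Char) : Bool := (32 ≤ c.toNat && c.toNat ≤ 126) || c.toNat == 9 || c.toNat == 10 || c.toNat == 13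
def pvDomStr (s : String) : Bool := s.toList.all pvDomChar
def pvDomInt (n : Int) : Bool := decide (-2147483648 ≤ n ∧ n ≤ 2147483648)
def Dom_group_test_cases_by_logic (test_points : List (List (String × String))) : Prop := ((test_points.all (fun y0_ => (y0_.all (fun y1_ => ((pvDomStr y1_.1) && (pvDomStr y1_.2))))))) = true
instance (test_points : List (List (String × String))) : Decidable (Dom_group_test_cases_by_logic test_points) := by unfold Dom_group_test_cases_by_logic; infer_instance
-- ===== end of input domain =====

-- B replaces A's index-window loop (range(0, n, 5) with a slice per index, inserting into the
-- dict inside the loop) by a recursive helper that peels 5 elements off the front per call,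
-- building the (name, chunk) pair list and converting it to a dict at the end: an alternative
-- decomposition of the same task.

-- ===== PORT A =====
def group_test_cases_by_logic (test_points : List (List (String × String))) : List (String × List (List (String × String))) :=
  (((PySem.List.pyRange 0 (PySem.List.len test_points) 5).foldl
      (fun d i => d.insert ("测试组 " ++ PySem.Int.toStr (PySem.Int.floordiv i 5 + 1))
                           (PySem.List.slice test_points (some i) (some (i + 5))))
      PySem.Dict.empty)).items

-- ===== PORT B =====
-- _chunks(rest, g): peel rest[:5] off, recurse on rest[5:] with g+1
def pvChunksB (rest : List (List (String × String))) (g : Int) : List (String × List (List (String × String))) :=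
  if rest = [] then []
  else ("测试组 " ++ PySem.Int.toStr g, PySem.List.slice rest none (some 5))
         :: pvChunksB (PySem.List.slice rest (some 5) none) (g + 1)
termination_by rest.length
decreasing_by
  rw [PySem.List.slice_from _ (by norm_num)]
  simp only [List.length_drop]
  have : rest.length ≠ 0 := by simpa [List.length_eq_zero_iff] using ‹¬ rest = []›
  omega

-- dict(pairs)
def group_test_cases_by_logic_alt (test_points : List (List (String × String))) : List (String × List (List (String × String))) :=
  (PySem.Dict.ofList (pvChunksB test_points 1)).items

-- ===== PRECONDITION & SPEC =====
def Spec_group_test_cases_by_logic (test_points : List (List (String × String))) (out : List (String × List (List (String × String)))) : Prop := out = group_test_cases_by_logic_alt test_points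
instance (test_points : List (List (String × String))) (out : List (String × List (List (String × String)))) : Decidable (Spec_group_test_cases_by_logic test_points out) := by unfold Spec_group_test_cases_by_logic; infer_instance

-- ===== CLAIM (what is proved, stated in full; the proofs are below) =====
def Claim_equal_group_test_cases_by_logic : Prop := ∀ (test_points : List (List (String × String))), Dom_group_test_cases_by_logic test_points → Spec_group_test_cases_by_logic test_points (group_test_cases_by_logic test_points)

-- ===== LEMMAS AND PROOFS =====

-- the group name, as both ports compute it
def gname (g : Int) : String := "测试组 " ++ PySem.Int.toStr g

-- the name of the k-th group (k counted from 0)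
def fN (k : Nat) : String := gname ((k : Int) + 1)

lemma toDigits_ne_nil (n : Nat) : Nat.toDigits 10 n ≠ [] := by
  rw [Nat.toDigits_eq_if (by norm_num)]
  split <;> simp

lemma digitChar_inj {a b : Nat} (ha : a < 10) (hb : b < 10) (h : a.digitChar = b.digitChar) : a = b := by
  interval_cases a <;> interval_cases b <;> simp_all [Nat.digitChar]

lemma toDigits10_inj : ∀ m n : Nat, Nat.toDigits 10 m = Nat.toDigits 10 n → m = n := by
  intro m
  induction m using Nat.strong_induction_on with
  | _ m ih =>
    intro n h
    rw [Nat.toDigits_eq_if (b := 10) (n := m) (by norm_num),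
        Nat.toDigits_eq_if (b := 10) (n := n) (by norm_num)] at h
    by_cases h1 : m < 10 <;> by_cases h2 : n < 10
    · rw [if_pos h1, if_pos h2] at h
      exact digitChar_inj h1 h2 (by simpa using h)
    · exfalso
      rw [if_pos h1, if_neg h2] at h
      have hl := congrArg List.length h
      simp only [List.length_singleton, List.length_append] at hl
      exact toDigits_ne_nil (n / 10) (List.length_eq_zero_iff.mp (by omega))
    · exfalso
      rw [if_neg h1, if_pos h2] at h
      have hl := congrArg List.length h
      simp only [List.length_singleton, List.length_append] at hl
      exact toDigits_ne_nil (m / 10) (List.length_eq_zero_iff.mp (by omega))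
    · rw [if_neg h1, if_neg h2] at h
      obtain ⟨hpre, hsuf⟩ := List.append_inj' h (by simp)
      have hdiv : m / 10 = n / 10 :=
        ih (m / 10) (Nat.div_lt_self (by omega) (by norm_num)) _ hpre
      have hmod : m % 10 = n % 10 :=
        digitChar_inj (Nat.mod_lt _ (by norm_num)) (Nat.mod_lt _ (by norm_num)) (by simpa using hsuf)
      omega

lemma gname_inj {a b : Int} (ha : 0 ≤ a) (hb : 0 ≤ b) (h : gname a = gname b) : a = b := by
  unfold gname at h
  have h2 := congrArg String.toList h
  rw [String.toList_append, String.toList_append] at h2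
  have h3 : (PySem.Int.toStr a).toList = (PySem.Int.toStr b).toList := List.append_cancel_left h2
  rw [PySem.Int.toList_toStr, PySem.Int.toList_toStr] at h3
  unfold PySem.Int.toChars at h3
  rw [if_neg (by omega), if_neg (by omega)] at h3
  have := toDigits10_inj _ _ h3
  omega

lemma fN_inj : Function.Injective fN := by
  intro j k h
  have := gname_inj (a := (j : Int) + 1) (b := (k : Int) + 1) (by omega) (by omega) h
  omega

-- A's result, as a map over chunk numbers
lemma A_items (tps : List (List (String × String))) :
    group_test_cases_by_logic tps
      = (List.range ((tps.length + 4) / 5)).map (fun k => (fN k, (tps.drop (5 * k)).take 5)) := by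
  unfold group_test_cases_by_logic
  rw [PySem.List.pyRange_of_pos 0 (PySem.List.len tps) (by norm_num)]
  have hcnt : (if (0:Int) < PySem.List.len tps then (((PySem.List.len tps) - 0 + 5 - 1)/5).toNat else 0) = (tps.length + 4)/5 := by
    simp only [PySem.List.len_eq]
    split <;> omega
  rw [hcnt, List.foldl_map]
  have hstep : (fun (d : PySem.Dict String (List (List (String × String)))) (k : Nat) =>
        d.insert ("测试组 " ++ PySem.Int.toStr (PySem.Int.floordiv (0 + 5*(k:Int)) 5 + 1))
          (PySem.List.slice tps (some (0 + 5*(k:Int))) (some (0 + 5*(k:Int) + 5))))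
      = (fun d k => d.insert (fN k) ((tps.drop (5*k)).take 5)) := by
    funext d k
    have h1 : PySem.Int.floordiv (0 + 5*(k:Int)) 5 = (k:Int) := by
      rw [PySem.Int.floordiv_eq_ediv_of_pos (by norm_num)]; omega
    have h2 : (0 + 5*(k:Int)) = ((5*k : Nat) : Int) := by push_cast; ring
    rw [h1, h2, show ((5:Int)) = ((5:Nat):Int) from by norm_num, PySem.List.slice_natCast_add]
    rfl
  rw [hstep]
  rw [PySem.Dict.items_foldl_insert_fresh (List.range ((tps.length + 4)/5)) fN
        (fun k => (tps.drop (5*k)).take 5) PySem.Dict.empty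
        (by intro a _; exact PySem.Dict.contains_empty _)
        ((List.nodup_range).map fN_inj)]
  rfl

-- B's pair list, as the same map over chunk numbers (shifted by k)
lemma chunksB_eq (n : Nat) (tps : List (List (String × String))) (hn : tps.length = n) (k : Nat) :
    pvChunksB tps ((k : Int) + 1)
      = (List.range ((tps.length + 4) / 5)).map (fun j => (fN (k + j), (tps.drop (5 * j)).take 5)) := by
  induction n using Nat.strong_induction_on generalizing tps k with
  | _ n ih =>
    rw [pvChunksB.eq_def]
    by_cases hnil : tps = []
    · subst hnil; simp
    · rw [if_neg hnil]
      have hpos : tps.length ≠ 0 := by simpa [List.length_eq_zero_iff] using hnil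
      rw [PySem.List.slice_to _ (by norm_num), PySem.List.slice_from _ (by norm_num)]
      have hrec := ih (tps.drop 5).length (by subst hn; simp only [List.length_drop]; omega)
        (tps.drop 5) rfl (k + 1)
      have hcast : ((k : Int) + 1) + 1 = (((k + 1 : Nat) : Int) + 1) := by push_cast; ring
      simp only [show ((5:Int).toNat) = 5 from rfl]
      rw [hcast, hrec]
      have hq : (tps.length + 4) / 5 = ((tps.drop 5).length + 4) / 5 + 1 := by
        simp only [List.length_drop]; omega
      rw [hq, List.range_succ_eq_map, List.map_cons, List.map_map]
      congr 1
      · apply List.map_congr_left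
        intro j _
        simp only [Function.comp]
        have h1 : k + 1 + j = k + j.succ := by omega
        have h2 : List.drop (5*j) (List.drop 5 tps) = List.drop (5*j.succ) tps := by
          rw [List.drop_drop]; congr 1; omega
        rw [h1, h2]

-- B's result, as the same map over chunk numbers
lemma B_items (tps : List (List (String × String))) :
    group_test_cases_by_logic_alt tps
      = (List.range ((tps.length + 4) / 5)).map (fun k => (fN k, (tps.drop (5 * k)).take 5)) := by
  unfold group_test_cases_by_logic_alt
  have h1 : (1 : Int) = ((0 : Nat) : Int) + 1 := by norm_num
  rw [h1, chunksB_eq tps.length tps rfl 0]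
  have hmap : (List.range ((tps.length + 4) / 5)).map (fun j => (fN (0 + j), (tps.drop (5 * j)).take 5))
      = (List.range ((tps.length + 4) / 5)).map (fun j => (fN j, (tps.drop (5 * j)).take 5)) := by
    apply List.map_congr_left; intro j _; simp
  rw [hmap]
  -- dict(pairs) is the insert-fold; the keys are fresh and distinct, so items = pairs
  show (((List.range ((tps.length + 4) / 5)).map (fun j => (fN j, (tps.drop (5 * j)).take 5))).foldl
      (fun d p => d.insert p.1 p.2) PySem.Dict.empty).items = _
  rw [List.foldl_map]
  rw [PySem.Dict.items_foldl_insert_fresh (List.range ((tps.length + 4)/5)) fN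
        (fun k => (tps.drop (5*k)).take 5) PySem.Dict.empty
        (by intro a _; exact PySem.Dict.contains_empty _)
        ((List.nodup_range).map fN_inj)]
  rfl

-- ===== VERDICT (by name: the statement is the Claim_ definition above) =====
theorem group_test_cases_by_logic_spec : Claim_equal_group_test_cases_by_logic := by
  intro tps _
  unfold Spec_group_test_cases_by_logic
  rw [A_items, B_items]
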